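-- pv_equiv track=rewrite | github.com/armandomruiz/TestProjects | find_permutation.py | check_nines
-- ===== SOURCE A (Python) =====
-- def check_nines(vector):
--     nines = [i for i, num in enumerate(vector) if num == '9']
--
--     for i in range(len(nines) - 1):
--         start = nines[i] + 1
--         end = nines[i+1]
--
--         numbers_between_9s = vector[start:end]
--         unique_numbers = set(numbers_between_9s)
--
--         if len(numbers_between_9s) != len(unique_numbers):
--             return False
--
--     return True
-- ===== SOURCE B (Python) =====
-- def check_nines(vector):
--     seen_nine = False
--     current = set()
--     current_has_dup = False
--     for x in vector:
--         if x == '9':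
--             if seen_nine and current_has_dup:
--                 return False
--             seen_nine = True
--             current = set()
--             current_has_dup = False
--         elif seen_nine:
--             if x in current:
--                 current_has_dup = True
--             current.add(x)
--     return True
-- ===== Notes on version B (the rewrite author's own statement) =====
-- stated objective: idiomatic
-- what changed: Replaced the collect-all-nine-indices-then-slice-and-set pass with a single left-to-right state machine (seen_nine flag, current set, duplicate flag) that defers each segment's verdict to the next '9', so no index list, no slices and no per-segment set copies are built.
import Mathlib
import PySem

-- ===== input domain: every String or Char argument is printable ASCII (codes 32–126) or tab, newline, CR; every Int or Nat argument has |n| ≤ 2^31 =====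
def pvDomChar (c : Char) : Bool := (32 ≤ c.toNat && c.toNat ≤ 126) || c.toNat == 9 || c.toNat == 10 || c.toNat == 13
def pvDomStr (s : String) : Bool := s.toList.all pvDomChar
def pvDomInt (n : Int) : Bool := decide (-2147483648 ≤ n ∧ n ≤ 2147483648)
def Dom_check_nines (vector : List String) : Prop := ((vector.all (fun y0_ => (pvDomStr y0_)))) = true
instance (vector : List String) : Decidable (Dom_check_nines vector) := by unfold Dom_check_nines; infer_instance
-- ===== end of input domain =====

-- B replaces A's index-collection-plus-slicing by a single-pass state machine (idiomatic one-pass rewrite); return values proved equal on all inputs.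

-- ===== PORT A =====
-- the 'for i in range(len(nines)-1)' loop with its early return
def check_nines_loop (vector : List String) (nines : List Int) : List Int → Bool
  | [] => true
  | i :: rest =>
    -- nines[i] / nines[i+1]: i ranges over range(len(nines)-1), so both indexings are in range; pyGetD is exact there
    let start := PySem.List.pyGetD nines i 0 + 1
    let stop := PySem.List.pyGetD nines (i + 1) 0
    let numbers_between_9s := PySem.List.slice vector (some start) (some stop)
    let unique_numbers := PySem.Set.ofList numbers_between_9s
    if numbers_between_9s.length ≠ unique_numbers.length then false
    else check_nines_loop vector nines rest

def check_nines (vector : List String) : Bool :=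
  let nines : List Int :=
    (PySem.List.enumerate vector).filterMap (fun p => if p.2 = "9" then some p.1 else none)
  check_nines_loop vector nines (PySem.List.pyRange 0 (PySem.List.len nines - 1) 1)

-- ===== PORT B =====
-- single pass; state = (seen_nine, current set, current_has_dup)
def check_nines_go (seen : Bool) (cur : PySem.Set String) (dup : Bool) : List String → Bool
  | [] => true
  | x :: xs =>
    if x = "9" then
      (if seen && dup then false else check_nines_go true PySem.Set.empty false xs)
    else if seen then
      check_nines_go seen (PySem.Set.add cur x) (dup || PySem.Set.contains cur x) xs
    else
      check_nines_go seen cur dup xs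

def check_nines_alt (vector : List String) : Bool :=
  check_nines_go false PySem.Set.empty false vector

-- ===== PRECONDITION & SPEC =====
def Spec_check_nines (vector : List String) (out : Bool) : Prop := out = check_nines_alt vector
instance (vector : List String) (out : Bool) : Decidable (Spec_check_nines vector out) := by unfold Spec_check_nines; infer_instance

-- ===== CLAIM (what is proved, stated in full; the proofs are below) =====
def Claim_equal_check_nines : Prop := ∀ (vector : List String), Dom_check_nines vector → Spec_check_nines vector (check_nines vector)

-- ===== LEMMAS AND PROOFS =====

-- positions of the '9' markers, as natural numbers, structurally
def natNines : List String → List Nat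
  | [] => []
  | x :: xs => if x = "9" then 0 :: (natNines xs).map (· + 1) else (natNines xs).map (· + 1)

def intNines (v : List String) : List Int := (natNines v).map (fun (n : Nat) => (n : Int))

-- A-side reading: check each consecutive pair of nine positions
def specPairs (v : List String) : List Int → Bool
  | a :: b :: rest =>
    decide (PySem.List.slice v (some (a + 1)) (some b)).Nodup && specPairs v (b :: rest)
  | _ => true

-- common spec: at each '9', the segment up to the NEXT '9' (if any) must be duplicate-free
def firstCheck (p xs : List String) : Bool :=
  if "9" ∈ xs then decide ((p ++ xs.takeWhile (fun s => s != "9")).Nodup) else true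

def specB : List String → Bool
  | [] => true
  | x :: xs => (if x = "9" then firstCheck [] xs else true) && specB xs

-- B-side reading with the accumulated current segment made explicit
def specB2 (p : List String) : List String → Bool
  | [] => true
  | x :: xs => if x = "9" then (decide p.Nodup && specB2 [] xs) else specB2 (p ++ [x]) xs

theorem nines_filterMap_eq (xs : List String) : ∀ (s : Int),
    (PySem.List.enumerate xs s).filterMap (fun p => if p.2 = "9" then some p.1 else none)
      = (natNines xs).map (fun (n : Nat) => (n : Int) + s) := by
  induction xs with
  | nil => intro s; simp [PySem.List.enumerate_nil, natNines]
  | cons x xs ih =>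
    intro s
    rw [PySem.List.enumerate_cons]
    by_cases hx : x = "9"
    · subst hx
      rw [show natNines ("9" :: xs) = 0 :: (natNines xs).map (· + 1) from by simp [natNines]]
      have hcons : List.filterMap (fun p : Int × String => if p.2 = "9" then some p.1 else none)
          ((s, "9") :: PySem.List.enumerate xs (s + 1))
          = s :: List.filterMap (fun p : Int × String => if p.2 = "9" then some p.1 else none)
              (PySem.List.enumerate xs (s + 1)) := by simp
      rw [hcons, List.map_cons, ih (s + 1), List.map_map]
      congr 1
      · simp
      · apply List.map_congr_left; intro n _; simp only [Function.comp_apply]; push_cast; ring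
    · rw [show natNines (x :: xs) = (natNines xs).map (· + 1) from by simp [natNines, hx]]
      have hcons : List.filterMap (fun p : Int × String => if p.2 = "9" then some p.1 else none)
          ((s, x) :: PySem.List.enumerate xs (s + 1))
          = List.filterMap (fun p : Int × String => if p.2 = "9" then some p.1 else none)
              (PySem.List.enumerate xs (s + 1)) := by simp [hx]
      rw [hcons, ih (s + 1), List.map_map]
      apply List.map_congr_left; intro n _; simp only [Function.comp_apply]; push_cast; ring

theorem foldlAdd_sublist : ∀ (xs s : List String), (xs.foldl PySem.Set.add s).Sublist (s ++ xs) := by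
  intro xs
  induction xs with
  | nil => intro s; simp
  | cons x xs ih =>
    intro s
    refine List.Sublist.trans (ih (PySem.Set.add s x)) ?_
    by_cases h : x ∈ s
    · rw [show PySem.Set.add s x = s from by simp [PySem.Set.add, h]]
      exact List.Sublist.append_left (List.sublist_cons_self x xs) s
    · rw [show PySem.Set.add s x = s ++ [x] from by simp [PySem.Set.add, h]]
      simp [List.append_assoc]

theorem ofList_len_eq_iff (xs : List String) :
    ((PySem.Set.ofList xs).length = xs.length) ↔ xs.Nodup := by
  constructor
  · intro h
    have hsub : (PySem.Set.ofList xs).Sublist xs := by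
      have := foldlAdd_sublist xs []
      simpa [PySem.Set.ofList_eq_foldl] using this
    have : PySem.Set.ofList xs = xs := hsub.eq_of_length h
    rw [← this]; exact PySem.Set.nodup_ofList xs
  · intro h
    rw [PySem.Set.ofList_eq_self_of_nodup xs h]

theorem specPairs_short (v : List String) (l : List Int) (h : l.length ≤ 1) :
    specPairs v l = true := by
  match l with
  | [] => rfl
  | [a] => rfl
  | a :: b :: rest => simp at h

theorem bridge (v : List String) (ns : List Int) :
    ∀ (m k : Nat), ns.length ≤ k + m →
      check_nines_loop v ns (PySem.List.pyRange (k : Int) ((ns.length : Int) - 1) 1)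
        = specPairs v (ns.drop k) := by
  intro m
  induction m with
  | zero =>
    intro k hk
    have h1 : PySem.List.pyRange (k : Int) ((ns.length : Int) - 1) 1 = [] := by
      apply List.eq_nil_of_length_eq_zero
      rw [PySem.List.length_pyRange_one]; omega
    rw [h1, List.drop_eq_nil_of_le (by omega)]
    rfl
  | succ m ih =>
    intro k hk
    by_cases h : (k : Int) < (ns.length : Int) - 1
    · have hk1 : k + 1 < ns.length := by omega
      have hk0 : k < ns.length := by omega
      rw [PySem.List.pyRange_one_cons h]
      show (if (PySem.List.slice v (some (PySem.List.pyGetD ns (k : Int) 0 + 1))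
              (some (PySem.List.pyGetD ns ((k : Int) + 1) 0))).length
            ≠ (PySem.Set.ofList (PySem.List.slice v (some (PySem.List.pyGetD ns (k : Int) 0 + 1))
              (some (PySem.List.pyGetD ns ((k : Int) + 1) 0)))).length then false
          else check_nines_loop v ns (PySem.List.pyRange ((k : Int) + 1) ((ns.length : Int) - 1) 1)) = _
      have e1 : PySem.List.pyGetD ns (k : Int) 0 = ns[k] := by
        rw [PySem.List.pyGetD_natCast, List.getD_eq_getElem ns 0 hk0]
      have e2 : PySem.List.pyGetD ns ((k : Int) + 1) 0 = ns[k + 1] := by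
        have : (k : Int) + 1 = ((k + 1 : Nat) : Int) := by push_cast; ring
        rw [this, PySem.List.pyGetD_natCast, List.getD_eq_getElem ns 0 hk1]
      have e3 : (k : Int) + 1 = ((k + 1 : Nat) : Int) := by push_cast; ring
      rw [e1, e2, e3, ih (k + 1) (by omega)]
      rw [List.drop_eq_getElem_cons hk0, List.drop_eq_getElem_cons hk1]
      show _ = specPairs v (ns[k] :: ns[k+1] :: ns.drop (k+2))
      rw [show specPairs v (ns[k] :: ns[k+1] :: ns.drop (k+2))
            = (decide (PySem.List.slice v (some (ns[k] + 1)) (some ns[k+1])).Nodup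
               && specPairs v (ns[k+1] :: ns.drop (k+2))) from rfl]
      by_cases hnd : (PySem.List.slice v (some (ns[k] + 1)) (some ns[k+1])).Nodup
      · rw [if_neg (by rw [(ofList_len_eq_iff _).mpr hnd]; simp)]
        simp [hnd]
      · rw [if_pos (show _ ≠ _ from fun hlen => hnd ((ofList_len_eq_iff _).mp hlen.symm))]
        simp [hnd]
    · have h1 : PySem.List.pyRange (k : Int) ((ns.length : Int) - 1) 1 = [] := by
        apply List.eq_nil_of_length_eq_zero
        rw [PySem.List.length_pyRange_one]; omega
      rw [h1]
      have : (ns.drop k).length ≤ 1 := by rw [List.length_drop]; omega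
      rw [specPairs_short v _ this]
      rfl

theorem specPairs_shift (x : String) (v : List String) : ∀ (ns : List Nat),
    specPairs (x :: v) (ns.map (fun (n : Nat) => (n : Int) + 1)) = specPairs v (ns.map (fun (n : Nat) => (n : Int))) := by
  intro ns
  induction ns with
  | nil => rfl
  | cons a tl ih =>
    cases tl with
    | nil => rfl
    | cons b rest =>
      show (decide (PySem.List.slice (x :: v) (some ((a : Int) + 1 + 1)) (some ((b : Int) + 1))).Nodup
            && specPairs (x :: v) (((b :: rest).map (fun (n : Nat) => (n : Int) + 1)))) = _
      rw [ih]
      show _ = (decide (PySem.List.slice v (some ((a : Int) + 1)) (some (b : Int))).Nodup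
            && specPairs v ((b :: rest).map (fun (n : Nat) => (n : Int))))
      congr 1
      have e1 : (a : Int) + 1 + 1 = ((a + 2 : Nat) : Int) := by push_cast; ring
      have e2 : (b : Int) + 1 = ((b + 1 : Nat) : Int) := by push_cast; ring
      have e3 : (a : Int) + 1 = ((a + 1 : Nat) : Int) := by push_cast; ring
      rw [e1, e2, e3, PySem.List.slice_natCast, PySem.List.slice_natCast]
      have : (x :: v).drop (a + 2) = v.drop (a + 1) := by simp [List.drop_succ_cons]
      rw [this, show b + 1 - (a + 2) = b - (a + 1) from by omega]

theorem natNines_nil_iff (xs : List String) : natNines xs = [] ↔ "9" ∉ xs := by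
  induction xs with
  | nil => simp [natNines]
  | cons x xs ih =>
    by_cases hx : x = "9"
    · subst hx; simp [natNines]
    · have hm : ("9" ∈ x :: xs) ↔ ("9" ∈ xs) := by
        rw [List.mem_cons]
        exact or_iff_right (fun h => hx h.symm)
      rw [show natNines (x :: xs) = (natNines xs).map (· + 1) from by simp [natNines, hx]]
      rw [List.map_eq_nil_iff, ih]
      exact ⟨fun h hm9 => h (hm.mp hm9), fun h hm9 => h (hm.mpr hm9)⟩

theorem takeWhile_eq_take_of_natNines (xs : List String) : ∀ (b : Nat) (rest : List Nat),
    natNines xs = b :: rest → xs.takeWhile (fun s => s != "9") = xs.take b := by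
  induction xs with
  | nil => intro b rest h; simp [natNines] at h
  | cons x xs ih =>
    intro b rest h
    by_cases hx : x = "9"
    · subst hx
      rw [show natNines ("9" :: xs) = 0 :: (natNines xs).map (· + 1) from by simp [natNines]] at h
      injection h with h1 _
      subst h1
      simp
    · rw [show natNines (x :: xs) = (natNines xs).map (· + 1) from by simp [natNines, hx]] at h
      cases hn : natNines xs with
      | nil => rw [hn] at h; simp at h
      | cons b' rest' =>
        rw [hn] at h
        rw [List.map_cons] at h
        injection h with h1 _
        subst h1
        rw [show (x :: xs).takeWhile (fun s => s != "9") = x :: xs.takeWhile (fun s => s != "9")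
            from by simp [hx]]
        rw [ih b' rest' hn]
        simp [List.take_succ_cons]

theorem A_eq_specB : ∀ (v : List String), specPairs v (intNines v) = specB v := by
  intro v
  induction v with
  | nil => rfl
  | cons x xs ih =>
    by_cases hx : x = "9"
    · subst hx
      cases hn : natNines xs with
      | nil =>
        have h9 : "9" ∉ xs := (natNines_nil_iff xs).mp hn
        have : intNines ("9" :: xs) = [(0 : Int)] := by
          simp [intNines, natNines, hn]
        rw [this]
        show true = specB ("9" :: xs)
        have : specB xs = true := by
          rw [← ih]; simp [intNines, hn, specPairs]
        simp [specB, firstCheck, h9, this]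
      | cons b rest =>
        have h9 : "9" ∈ xs := by
          by_contra h
          rw [(natNines_nil_iff xs).mpr h] at hn; simp at hn
        have htw := takeWhile_eq_take_of_natNines xs b rest hn
        have e0 : intNines ("9" :: xs)
            = (0 : Int) :: (b :: rest).map (fun (n : Nat) => (n : Int) + 1) := by
          simp [intNines, natNines, hn, List.map_map]
        rw [e0]
        show (decide (PySem.List.slice ("9" :: xs) (some ((0:Int) + 1)) (some ((b : Int) + 1))).Nodup
              && specPairs ("9" :: xs) ((b :: rest).map (fun (n : Nat) => (n : Int) + 1))) = _
        rw [specPairs_shift]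
        have e1 : specPairs xs ((b :: rest).map (fun (n : Nat) => (n : Int))) = specPairs xs (intNines xs) := by
          simp [intNines, hn]
        rw [e1, ih]
        have e2 : PySem.List.slice ("9" :: xs) (some ((0:Int) + 1)) (some ((b : Int) + 1))
            = xs.take b := by
          have h1 : (0 : Int) + 1 = ((1 : Nat) : Int) := by norm_num
          have h2 : (b : Int) + 1 = ((b + 1 : Nat) : Int) := by push_cast; ring
          rw [h1, h2, PySem.List.slice_natCast]
          simp
        rw [e2]
        show _ = specB ("9" :: xs)
        simp [specB, firstCheck, h9, htw]
    · have e0 : intNines (x :: xs) = (natNines xs).map (fun (n : Nat) => (n : Int) + 1) := by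
        simp [intNines, natNines, hx, List.map_map]
      rw [e0, specPairs_shift]
      have e1 : specPairs xs ((natNines xs).map (fun (n : Nat) => (n : Int))) = specPairs xs (intNines xs) := rfl
      rw [e1, ih]
      simp [specB, hx]

theorem contains_ofList (p : List String) (x : String) :
    PySem.Set.contains (PySem.Set.ofList p) x = decide (x ∈ p) := by
  simp [PySem.Set.contains]

theorem Mgen : ∀ (xs p : List String),
    check_nines_go true (PySem.Set.ofList p) (!decide p.Nodup) xs = specB2 p xs := by
  intro xs
  induction xs with
  | nil => intro p; rfl
  | cons x xs ih =>
    intro p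
    by_cases hx : x = "9"
    · subst hx
      have h0 : check_nines_go true [] false xs = specB2 [] xs := by
        simpa [PySem.Set.ofList, PySem.Set.empty] using ih []
      by_cases hp : p.Nodup
      · simp [check_nines_go, specB2, hp, h0]
      · simp [check_nines_go, specB2, hp]
    · have e1 : PySem.Set.add (PySem.Set.ofList p) x = PySem.Set.ofList (p ++ [x]) := by
        rw [PySem.Set.ofList_eq_foldl, PySem.Set.ofList_eq_foldl, List.foldl_append]
        rfl
      have e2 : (!decide p.Nodup || PySem.Set.contains (PySem.Set.ofList p) x)
          = !decide ((p ++ [x]).Nodup) := by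
        rw [contains_ofList]
        by_cases hnp : p.Nodup <;> by_cases hxp : x ∈ p <;>
          simp [hnp, hxp, List.nodup_append] <;>
          try exact fun a ha he => hxp (he ▸ ha)
      rw [show check_nines_go true (PySem.Set.ofList p) (!decide p.Nodup) (x :: xs)
            = check_nines_go true (PySem.Set.add (PySem.Set.ofList p) x)
                (!decide p.Nodup || PySem.Set.contains (PySem.Set.ofList p) x) xs
          from by simp [check_nines_go, hx]]
      rw [e1, e2, ih (p ++ [x])]
      simp [specB2, hx]

theorem specB2_eq (xs : List String) : ∀ (p : List String),
    specB2 p xs = (firstCheck p xs && specB xs) := by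
  induction xs with
  | nil => intro p; simp [specB2, firstCheck, specB]
  | cons x xs ih =>
    intro p
    by_cases hx : x = "9"
    · subst hx
      rw [show specB2 p ("9" :: xs) = (decide p.Nodup && specB2 [] xs) from by simp [specB2]]
      rw [ih []]
      have e1 : firstCheck p ("9" :: xs) = decide p.Nodup := by
        simp [firstCheck]
      have e2 : specB ("9" :: xs) = (firstCheck [] xs && specB xs) := by simp [specB]
      rw [e1, e2]
    · rw [show specB2 p (x :: xs) = specB2 (p ++ [x]) xs from by simp [specB2, hx]]
      rw [ih (p ++ [x])]
      have e1 : firstCheck p (x :: xs) = firstCheck (p ++ [x]) xs := by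
        have htw : (x :: xs).takeWhile (fun s => s != "9") = x :: xs.takeWhile (fun s => s != "9") := by
          simp [hx]
        have hm : ("9" ∈ x :: xs) ↔ ("9" ∈ xs) := by
          rw [List.mem_cons]
          exact or_iff_right (fun h => hx h.symm)
        simp only [firstCheck, htw, hm]
        rw [List.append_cons]
      have e2 : specB (x :: xs) = specB xs := by simp [specB, hx]
      rw [e1, e2]

theorem skip_eq (v : List String) : ∀ (s : PySem.Set String) (d : Bool),
    check_nines_go false s d v = specB v := by
  induction v with
  | nil => intro s d; rfl
  | cons x xs ih =>
    intro s d
    by_cases hx : x = "9"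
    · subst hx
      rw [show check_nines_go false s d ("9" :: xs) = check_nines_go true PySem.Set.empty false xs
          from by simp [check_nines_go]]
      have h1 : check_nines_go true PySem.Set.empty false xs = specB2 [] xs := by
        simpa [PySem.Set.ofList, PySem.Set.empty] using Mgen xs []
      rw [h1, specB2_eq xs []]
      simp [specB]
    · rw [show check_nines_go false s d (x :: xs) = check_nines_go false s d xs
          from by simp [check_nines_go, hx]]
      rw [ih s d]
      simp [specB, hx]

-- ===== VERDICT (by name: the statement is the Claim_ definition above) =====
theorem check_nines_spec : Claim_equal_check_nines := by
  intro v _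
  show check_nines v = check_nines_alt v
  simp only [check_nines, check_nines_alt]
  rw [nines_filterMap_eq v 0]
  have e0 : (natNines v).map (fun (n : Nat) => (n : Int) + 0) = intNines v := by
    simp [intNines]
  rw [e0, PySem.List.len_eq]
  have hb := bridge v (intNines v) (intNines v).length 0 (by omega)
  simp only [Nat.cast_zero] at hb
  rw [hb, List.drop_zero, A_eq_specB v, skip_eq v]
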